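-- pv_equiv track=rewrite | github.com/dj9308/Algorithm | programmers/Solved/대충 만든 자판.py | solution
-- ===== SOURCE A (Python) =====
-- def solution(keymap, targets):
--     answer = []
--
--     for target in targets:
--         sum = 0
--         noneChk = False
--         for letter in target:
--             min = 101
--             for key in keymap:
--                 if key.count(letter) != 0:
--                     cnt = key.index(letter)+1
--                     if cnt < min:
--                         min = cnt
--             if min == 101:
--                 noneChk = True
--                 break
--             sum += min
--         if noneChk:
--             answer.append(-1)
--         else:
--             answer.append(sum)
--     return answer
-- ===== SOURCE B (Python) =====
-- def solution(keymap, targets):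
--     # One pass over keymap builds char -> minimal press count (only values < 101 get stored)
--     best = {}
--     for key in keymap:
--         for i, ch in enumerate(key):
--             if i + 1 < best.get(ch, 101):
--                 best[ch] = i + 1
--     answer = []
--     for target in targets:
--         total = 0
--         for ch in target:
--             p = best.get(ch, 101)
--             if p == 101:
--                 total = -1
--                 break
--             total += p
--         answer.append(total)
--     return answer
-- ===== Notes on version B (the rewrite author's own statement) =====
-- stated objective: faster
-- what changed: Replaces the per-letter nested scan over keymap (count + index per key) with a single up-front pass over keymap that builds a dict char -> minimal press position (<101), so each target letter is a single dict lookup.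
import Mathlib
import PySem

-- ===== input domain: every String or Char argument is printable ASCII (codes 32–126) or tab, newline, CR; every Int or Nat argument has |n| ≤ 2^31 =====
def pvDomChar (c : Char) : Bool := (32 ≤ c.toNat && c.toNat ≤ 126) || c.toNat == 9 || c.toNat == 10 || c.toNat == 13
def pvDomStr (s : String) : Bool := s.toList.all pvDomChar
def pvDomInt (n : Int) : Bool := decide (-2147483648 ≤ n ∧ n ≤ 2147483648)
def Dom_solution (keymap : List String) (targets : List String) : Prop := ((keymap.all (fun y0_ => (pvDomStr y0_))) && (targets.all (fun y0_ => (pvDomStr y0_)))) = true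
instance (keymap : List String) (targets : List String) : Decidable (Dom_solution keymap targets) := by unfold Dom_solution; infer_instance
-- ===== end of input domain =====

-- B precomputes a char -> minimal-press dict in one pass over keymap instead of A's nested per-letter scan; return value proved equal on all inputs.

-- ===== PORT A =====
-- one step of A's inner 'for key in keymap' loop: key.count(letter), key.index(letter)+1, keep the minimum
def aStep (c : Char) (m : Int) (key : String) : Int :=
  if PySem.List.count key.toList c ≠ 0 then
    let cnt : Int := ((PySem.List.index? key.toList c).getD 0 : Nat) + 1
    if cnt < m then cnt else m
  else m

-- A's 'for letter in target' loop with the noneChk/break modelled as early return of -1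
def aTarget (keymap : List String) : List Char → Int → Int
  | [], s => s
  | c :: rest, s =>
    let m := keymap.foldl (fun m key => aStep c m key) 101
    if m == 101 then (-1) else aTarget keymap rest (s + m)

def solution (keymap : List String) (targets : List String) : List Int :=
  targets.map (fun t => aTarget keymap t.toList 0)

-- ===== PORT B =====
def bStep (d : PySem.Dict Char Int) (p : Int × Char) : PySem.Dict Char Int :=
  if p.1 + 1 < d.getD p.2 101 then d.insert p.2 (p.1 + 1) else d

-- one pass over keymap: best[ch] = minimal (index+1) < 101
def bDict (keymap : List String) : PySem.Dict Char Int :=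
  keymap.foldl (fun d key => (PySem.List.enumerate key.toList).foldl bStep d) PySem.Dict.empty

def bTarget (d : PySem.Dict Char Int) : List Char → Int → Int
  | [], total => total
  | c :: rest, total =>
    let p := d.getD c 101
    if p == 101 then (-1) else bTarget d rest (total + p)

def solution_alt (keymap : List String) (targets : List String) : List Int :=
  let best := bDict keymap
  targets.map (fun t => bTarget best t.toList 0)

-- ===== PRECONDITION & SPEC =====
def Spec_solution (keymap : List String) (targets : List String) (out : List Int) : Prop := out = solution_alt keymap targets
instance (keymap : List String) (targets : List String) (out : List Int) : Decidable (Spec_solution keymap targets out) := by unfold Spec_solution; infer_instance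

-- ===== CLAIM (what is proved, stated in full; the proofs are below) =====
def Claim_equal_solution : Prop := ∀ (keymap : List String) (targets : List String), Dom_solution keymap targets → Spec_solution keymap targets (solution keymap targets)

-- ===== LEMMAS AND PROOFS =====

-- after folding one key's enumerate, the stored value for c is min(old, first index of c + 1)
theorem bStep_fold_getD (cs : List Char) : ∀ (i : Int) (d : PySem.Dict Char Int) (c : Char),
    ((PySem.List.enumerate cs i).foldl bStep d).getD c 101 =
      match PySem.List.index? cs c with
      | none => d.getD c 101
      | some k => if i + k + 1 < d.getD c 101 then i + k + 1 else d.getD c 101 := by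
  induction cs with
  | nil => intro i d c; simp [PySem.List.enumerate_nil, PySem.List.index?_eq_idxOf?, List.idxOf?]
  | cons ch rest ih =>
    intro i d c
    rw [PySem.List.enumerate_cons, List.foldl_cons, ih]
    by_cases hc : ch = c
    · subst hc
      have hb : (bStep d (i, ch)).getD ch 101 = if i + 1 < d.getD ch 101 then i + 1 else d.getD ch 101 := by
        simp only [bStep]
        split_ifs with h
        · rw [PySem.Dict.getD_insert, if_pos rfl]
        · rfl
      rw [PySem.List.index?_cons_self]
      cases h : PySem.List.index? rest ch <;> simp only [hb] <;> split_ifs <;> first | omega | simp_all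
    · have hd : (bStep d (i, ch)).getD c 101 = d.getD c 101 := by
        simp only [bStep]
        split_ifs with h
        · exact PySem.Dict.getD_insert_of_ne d _ _ (fun he => hc he.symm)
        · rfl
      rw [PySem.List.index?_cons_of_ne rest hc]
      cases h : PySem.List.index? rest c <;>
        simp only [Option.map_some, Option.map_none, hd]; split_ifs <;> first | omega | (simp_all; try ring)

theorem key_fold_getD (key : String) (d : PySem.Dict Char Int) (c : Char) :
    ((PySem.List.enumerate key.toList).foldl bStep d).getD c 101 = aStep c (d.getD c 101) key := by
  rw [bStep_fold_getD key.toList 0 d c]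
  unfold aStep
  cases h : PySem.List.index? key.toList c with
  | none =>
    have hnm : c ∉ key.toList := (PySem.List.index?_eq_none_iff _ _).mp h
    simp [PySem.List.count_eq, List.count_eq_zero.mpr hnm]
  | some k =>
    have hmem : c ∈ key.toList := (PySem.List.index?_isSome_iff _ _).mp (by rw [h]; rfl)
    have hcnt : PySem.List.count key.toList c ≠ 0 := by
      simp [PySem.List.count_eq, List.count_eq_zero]; exact hmem
    simp only [hcnt, if_true, Option.getD_some, ne_eq, not_false_iff]
    split_ifs <;> first | omega | simp_all

theorem bDict_fold_getD (km : List String) : ∀ (d : PySem.Dict Char Int) (c : Char),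
    (km.foldl (fun d key => (PySem.List.enumerate key.toList).foldl bStep d) d).getD c 101 =
      km.foldl (aStep c) (d.getD c 101) := by
  induction km with
  | nil => intro d c; rfl
  | cons key rest ih =>
    intro d c
    rw [List.foldl_cons, List.foldl_cons, ih, key_fold_getD]

theorem bDict_getD (km : List String) (c : Char) :
    (bDict km).getD c 101 = km.foldl (aStep c) 101 := by
  unfold bDict
  rw [bDict_fold_getD]
  rfl

theorem target_eq (km : List String) (cs : List Char) : ∀ (s : Int),
    aTarget km cs s = bTarget (bDict km) cs s := by
  induction cs with
  | nil => intro s; rfl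
  | cons c rest ih =>
    intro s
    simp only [aTarget, bTarget, bDict_getD km c]
    split_ifs <;> simp_all

-- ===== VERDICT (by name: the statement is the Claim_ definition above) =====
theorem solution_spec : Claim_equal_solution := by
  intro keymap targets _
  unfold Spec_solution solution solution_alt
  exact List.map_congr_left (fun t _ => target_eq keymap t.toList 0)
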